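-- pv_equiv track=rewrite | github.com/kvld/screenshots-frames | process.py | value_or_default
-- ===== SOURCE A (Python) =====
-- def value_or_default(arr, key):
--     for obj in arr:
--         if key in obj:
--             return obj[key]
--     for obj in arr:
--         if 'default' in obj:
--             return obj['default']
--     return None
-- ===== SOURCE B (Python) =====
-- def value_or_default(arr, key):
--     seen = False
--     dflt = None
--     for obj in arr:
--         if key in obj:
--             return obj[key]
--         if not seen and 'default' in obj:
--             seen = True
--             dflt = obj['default']
--     return dflt if seen else None
-- ===== Notes on version B (the rewrite author's own statement) =====
-- stated objective: simpler
-- what changed: Replaces A's two sequential scans (one for key, one for 'default') by a single pass that returns on the first key hit and captures the first 'default' value in a flag-guarded variable.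
import Mathlib
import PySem

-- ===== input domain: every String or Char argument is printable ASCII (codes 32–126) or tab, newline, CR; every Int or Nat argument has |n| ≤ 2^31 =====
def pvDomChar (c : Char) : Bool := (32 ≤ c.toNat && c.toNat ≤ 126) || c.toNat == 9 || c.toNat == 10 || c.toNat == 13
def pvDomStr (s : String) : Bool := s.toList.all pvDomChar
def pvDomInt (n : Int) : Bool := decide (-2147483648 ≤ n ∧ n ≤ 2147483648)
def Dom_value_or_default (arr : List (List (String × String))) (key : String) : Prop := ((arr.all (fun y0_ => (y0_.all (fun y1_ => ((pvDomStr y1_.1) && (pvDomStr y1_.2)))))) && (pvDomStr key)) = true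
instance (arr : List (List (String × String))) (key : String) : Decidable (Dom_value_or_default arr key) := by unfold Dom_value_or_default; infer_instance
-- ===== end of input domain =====

-- B replaces A's two sequential scans with one pass capturing the first 'default' (simpler decomposition).

-- ===== PORT A =====
-- one 'for obj in arr: if k in obj: return obj[k]' loop of A (used for each of A's two loops)
def vodScan (arr : List (List (String × String))) (k : String) : Option String :=
  match arr with
  | [] => none
  | obj :: rest =>
    match (PySem.Dict.mk obj).get? k with
    | some v => some v
    | none => vodScan rest k

def value_or_default (arr : List (List (String × String))) (key : String) : Option String :=
  match vodScan arr key with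
  | some v => some v
  | none =>
    match vodScan arr "default" with
    | some v => some v
    | none => none

-- ===== PORT B =====
-- single pass; acc = none ↔ B's 'seen' flag is False (the captured default is a String, so Option encodes flag+value)
def vodGo (key : String) (arr : List (List (String × String))) (acc : Option String) : Option String :=
  match arr with
  | [] => acc
  | obj :: rest =>
    match (PySem.Dict.mk obj).get? key with
    | some v => some v
    | none =>
      match acc with
      | some _ => vodGo key rest acc
      | none =>
        match (PySem.Dict.mk obj).get? "default" with
        | some d => vodGo key rest (some d)
        | none => vodGo key rest none

def value_or_default_alt (arr : List (List (String × String))) (key : String) : Option String :=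
  vodGo key arr none

-- ===== PRECONDITION & SPEC =====
def Spec_value_or_default (arr : List (List (String × String))) (key : String) (out : Option String) : Prop := out = value_or_default_alt arr key
instance (arr : List (List (String × String))) (key : String) (out : Option String) : Decidable (Spec_value_or_default arr key out) := by unfold Spec_value_or_default; infer_instance

-- ===== CLAIM (what is proved, stated in full; the proofs are below) =====
def Claim_equal_value_or_default : Prop := ∀ (arr : List (List (String × String))) (key : String), Dom_value_or_default arr key → Spec_value_or_default arr key (value_or_default arr key)

-- ===== LEMMAS AND PROOFS =====
theorem vodGo_eq (key : String) (arr : List (List (String × String))) (acc : Option String) :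
    vodGo key arr acc =
      match vodScan arr key with
      | some v => some v
      | none =>
        match acc with
        | some d => some d
        | none => vodScan arr "default" := by
  induction arr generalizing acc with
  | nil => cases acc <;> simp [vodGo, vodScan]
  | cons obj rest ih =>
    simp only [vodGo, vodScan]
    cases h : (PySem.Dict.mk obj).get? key with
    | some v => simp
    | none =>
      cases acc with
      | some d => simp [ih]
      | none =>
        cases hd : (PySem.Dict.mk obj).get? "default" with
        | some d => simp [ih]
        | none => simp [ih]

-- ===== VERDICT (by name: the statement is the Claim_ definition above) =====
theorem value_or_default_spec : Claim_equal_value_or_default := by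
  intro arr key _
  unfold Spec_value_or_default value_or_default value_or_default_alt
  rw [vodGo_eq]
  cases vodScan arr key <;> [skip; rfl]
  cases vodScan arr "default" <;> rfl
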